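-- pv_equiv track=rewrite | github.com/peaciu29ernb/logslice | logslice/limit.py | skip_records
-- ===== SOURCE A (Python) =====
-- from typing import Iterable, Iterator
--
-- def skip_records(records: Iterable[dict], offset: int) -> Iterator[dict]:
--     """Skip the first `offset` records from the stream."""
--     if offset < 0:
--         raise ValueError(f"offset must be non-negative, got {offset}")
--     it = iter(records)
--     skipped = 0
--     for record in it:
--         if skipped < offset:
--             skipped += 1
--             continue
--         yield record
-- ===== SOURCE B (Python) =====
-- from typing import Iterable, Iterator
--
-- def skip_records(records: Iterable[dict], offset: int) -> Iterator[dict]: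
--     """Skip the first `offset` records from the stream."""
--     if offset < 0:
--         raise ValueError(f"offset must be non-negative, got {offset}")
--     buf = list(records)
--     yield from buf[offset:]
-- ===== Notes on version B (the rewrite author's own statement) =====
-- stated objective: alternative
-- what changed: A streams with a per-record skipped counter and branch; B materializes the input into a list and emits the tail with one slice buf[offset:], removing per-item skip logic (trading streaming laziness for a single random-access slice).
-- outside the precondition, e.g. on skip_records([{'k': 'v'}], -1): A raises ValueError, B raises ValueError
import Mathlib
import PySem

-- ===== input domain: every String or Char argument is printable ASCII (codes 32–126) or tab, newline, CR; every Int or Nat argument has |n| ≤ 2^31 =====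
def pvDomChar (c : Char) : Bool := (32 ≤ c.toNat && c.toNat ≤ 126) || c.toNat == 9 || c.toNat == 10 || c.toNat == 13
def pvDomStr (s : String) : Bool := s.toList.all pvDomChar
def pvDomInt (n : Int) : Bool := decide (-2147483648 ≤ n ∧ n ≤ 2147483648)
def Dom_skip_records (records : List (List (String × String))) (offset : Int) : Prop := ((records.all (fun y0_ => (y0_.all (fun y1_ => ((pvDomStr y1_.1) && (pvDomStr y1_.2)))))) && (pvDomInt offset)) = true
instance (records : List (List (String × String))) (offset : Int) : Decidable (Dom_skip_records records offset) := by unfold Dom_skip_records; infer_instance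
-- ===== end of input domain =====

-- B materializes the stream into a list and emits the tail with one slice buf[offset:]
-- instead of A's per-record counter-and-branch loop; alternative decomposition, same cost.
-- Both Pythons are generators; equivalence is about the materialized output list.

-- ===== PORT A =====
-- loop `for record in it: if skipped < offset: skipped += 1; continue; yield record`
def skipRecordsLoop (xs : List (List (String × String))) (skipped offset : Int) : List (List (String × String)) :=
  match xs with
  | [] => []
  | r :: rest =>
    if skipped < offset then skipRecordsLoop rest (skipped + 1) offset
    else r :: skipRecordsLoop rest skipped offset

def skip_records (records : List (List (String × String))) (offset : Int) : List (List (String × String)) :=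
  skipRecordsLoop records 0 offset

-- ===== PORT B =====
-- `buf = list(records); yield from buf[offset:]` — the slice buf[offset:] via PySem.List.slice.
def skip_records_alt (records : List (List (String × String))) (offset : Int) : List (List (String × String)) :=
  PySem.List.slice records (some offset) none

-- ===== PRECONDITION & SPEC =====
-- A raises ValueError for negative offset; excluded here.
def Pre_skip_records (records : List (List (String × String))) (offset : Int) : Prop := 0 ≤ offset
instance (records : List (List (String × String))) (offset : Int) : Decidable (Pre_skip_records records offset) := by unfold Pre_skip_records; infer_instance
def pvWitness_skip_records : (List (List (String × String))) × Int := ([[("a", "1")], [("b", "2")]], 1)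
def Spec_skip_records (records : List (List (String × String))) (offset : Int) (out : List (List (String × String))) : Prop := out = skip_records_alt records offset
instance (records : List (List (String × String))) (offset : Int) (out : List (List (String × String))) : Decidable (Spec_skip_records records offset out) := by unfold Spec_skip_records; infer_instance

-- ===== CLAIM (what is proved, stated in full; the proofs are below) =====
def Claim_equal_skip_records : Prop := ∀ (records : List (List (String × String))) (offset : Int), Dom_skip_records records offset → Pre_skip_records records offset → Spec_skip_records records offset (skip_records records offset)

-- ===== LEMMAS AND PROOFS =====
theorem skipRecordsLoop_eq_drop (xs : List (List (String × String))) (skipped offset : Int) :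
    skipRecordsLoop xs skipped offset = xs.drop (offset - skipped).toNat := by
  induction xs generalizing skipped with
  | nil => simp [skipRecordsLoop]
  | cons r rest ih =>
    by_cases h : skipped < offset
    · have hn : (offset - skipped).toNat = (offset - (skipped + 1)).toNat + 1 := by omega
      simp [skipRecordsLoop, h, ih, hn]
    · have hn : (offset - skipped).toNat = 0 := by omega
      simp [skipRecordsLoop, h, ih, hn]

-- ===== VERDICT (by name: the statement is the Claim_ definition above) =====
theorem skip_records_spec : Claim_equal_skip_records := by
  intro records offset _ hpre
  unfold Spec_skip_records skip_records skip_records_alt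
  rw [skipRecordsLoop_eq_drop, PySem.List.slice_from records hpre]
  congr 1
  omega
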